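-- pv_equiv track=rewrite | github.com/samuski/Simple-Encryption | Encrypt.py | keygen
-- ===== SOURCE A (Python) =====
-- def keygen(key, length):
--     keystring = []
--     temp = []
--     output = []
--
--     for i in key:
--         keystring.append(int(i))
--
--     list1 = keystring
--     list2 = keystring[::2] + keystring[1::2]
--     list3 = keystring[3::4] + keystring[2::4] + keystring[1::4] + keystring[::4]
--
--     for i in range(length):
--         val = list1[i]
--         list1.append(list1[i])
--         list2.append(list2[i])
--         list3.append(list3[i])
--         temp += str(val)
--
--     for i in temp:
--         output.append(str(i))
--
--     return output
-- ===== SOURCE B (Python) =====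
-- def keygen(key, length):
--     digits = [int(c) for c in key]
--     output = []
--     j = 0
--     for _ in range(length):
--         output.append(str(digits[j]))
--         j += 1
--         if j == len(digits):
--             j = 0
--     return output
-- ===== Notes on version B (the rewrite author's own statement) =====
-- stated objective: simpler
-- what changed: B drops A's three self-extending shadow lists and character-level temp buffer, and instead walks a plain digit list with one wrap-around pointer, appending str(digit) directly.
import Mathlib
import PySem

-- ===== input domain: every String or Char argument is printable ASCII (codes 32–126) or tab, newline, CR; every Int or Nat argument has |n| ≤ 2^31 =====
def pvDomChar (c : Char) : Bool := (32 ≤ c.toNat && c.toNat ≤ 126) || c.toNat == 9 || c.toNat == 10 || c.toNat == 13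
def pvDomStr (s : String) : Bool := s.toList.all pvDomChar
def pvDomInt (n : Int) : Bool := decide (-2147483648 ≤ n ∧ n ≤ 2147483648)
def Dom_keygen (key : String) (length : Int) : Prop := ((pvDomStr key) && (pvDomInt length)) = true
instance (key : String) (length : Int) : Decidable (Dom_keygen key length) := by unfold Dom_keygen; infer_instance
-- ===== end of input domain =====

-- B replaces A's three self-extending shadow lists and char-level temp buffer by a single
-- wrap-around pointer walk over the digit list; same return value on Pre_ (digit-only key,
-- and a nonempty key when length > 0 — elsewhere A raises ValueError/IndexError).


-- ===== PORT A =====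
-- int(c) for a single char; .getD 0 is only reached when int() would raise ValueError (excluded by Pre_)
def pvDig (c : Char) : Int := (PySem.Int.ofStr? (String.ofList [c])).getD 0

-- the body of A's 'for i in range(length)' loop; pyGetD default 0 only reached on IndexError (excluded by Pre_)
def keygenStep (st : List Int × List Int × List Int × List Char) (i : Int) :
    List Int × List Int × List Int × List Char :=
  let val := PySem.List.pyGetD st.1 i 0
  (st.1 ++ [PySem.List.pyGetD st.1 i 0],
   st.2.1 ++ [PySem.List.pyGetD st.2.1 i 0],
   st.2.2.1 ++ [PySem.List.pyGetD st.2.2.1 i 0],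
   st.2.2.2 ++ PySem.Int.toChars val)

def keygen (key : String) (length : Int) : List String :=
  let keystring := key.toList.foldl (fun acc c => acc ++ [pvDig c]) []
  let list1 := keystring
  let list2 := (PySem.List.slice? keystring none none 2).getD [] ++
               (PySem.List.slice? keystring (some 1) none 2).getD []
  let list3 := (PySem.List.slice? keystring (some 3) none 4).getD [] ++
               (PySem.List.slice? keystring (some 2) none 4).getD [] ++
               (PySem.List.slice? keystring (some 1) none 4).getD [] ++
               (PySem.List.slice? keystring none none 4).getD []
  let st := (PySem.List.pyRange 0 length 1).foldl keygenStep (list1, list2, list3, [])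
  -- 'for i in temp: output.append(str(i))' — str of a one-char string is itself
  st.2.2.2.foldl (fun out c => out ++ [String.ofList [c]]) []

-- ===== PORT B =====
-- digits[j] with j always a valid index under Pre_; .getD 0 only reached on IndexError (excluded by Pre_)
def keygen_alt (key : String) (length : Int) : List String :=
  let digits := key.toList.map pvDig
  let st := (PySem.List.pyRange 0 length 1).foldl
    (fun (st : List String × Nat) _ =>
      let out := st.1 ++ [PySem.Int.toStr (digits.getD st.2 0)]
      let j := st.2 + 1
      (out, if j = digits.length then 0 else j))
    ([], 0)
  st.1

-- ===== PRECONDITION & SPEC =====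
-- Pre_ admits exactly the inputs where A returns: every key char a decimal digit
-- (else int(c) raises ValueError) and, when length > 0, a nonempty key (else IndexError).
def Pre_keygen (key : String) (length : Int) : Prop :=
  (key.toList.all (fun c => 48 ≤ c.toNat && c.toNat ≤ 57)) = true ∧ (0 < length → key.toList ≠ [])
instance (key : String) (length : Int) : Decidable (Pre_keygen key length) := by
  unfold Pre_keygen; infer_instance

def pvWitness_keygen : String × Int := ("123", 5)

def Spec_keygen (key : String) (length : Int) (out : List String) : Prop := out = keygen_alt key length
instance (key : String) (length : Int) (out : List String) : Decidable (Spec_keygen key length out) := by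
  unfold Spec_keygen; infer_instance

-- ===== CLAIM (what is proved, stated in full; the proofs are below) =====
def Claim_equal_keygen : Prop := ∀ (key : String) (length : Int),
  Dom_keygen key length → Pre_keygen key length → Spec_keygen key length (keygen key length)

-- ===== LEMMAS AND PROOFS =====

-- the cyclic value A's self-extending list1 (and B's pointer walk) produces at step i
def pvCyc (l : List Int) (i : Nat) : Int := l.getD (i % l.length) 0

lemma pvCyc_getD (l : List Int) (hl : l ≠ []) (k i : Nat) (hi : i < l.length + k) :
    (l ++ (List.range k).map (pvCyc l)).getD i 0 = pvCyc l i := by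
  have hn : 0 < l.length := List.length_pos_iff.mpr hl
  by_cases h : i < l.length
  · rw [List.getD_append l _ 0 i h, pvCyc, Nat.mod_eq_of_lt h]
  · have h' : l.length ≤ i := by omega
    rw [List.getD_append_right l _ 0 i h',
        List.getD_eq_getElem _ _ (by simpa using (by omega : i - l.length < k))]
    simp only [List.getElem_map, List.getElem_range]
    rw [pvCyc, pvCyc, ← Nat.mod_eq_sub_mod h']

lemma pvSuccMod (n k : Nat) (hn : 0 < n) :
    (if k % n + 1 = n then 0 else k % n + 1) = (k + 1) % n := by
  have hd := Nat.div_add_mod k n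
  have h1 : k % n < n := Nat.mod_lt _ hn
  by_cases h : k % n + 1 = n
  · have hm : (k / n + 1) * n = n * (k / n) + n := by ring
    have he : k + 1 = (k / n + 1) * n := by omega
    rw [if_pos h, he, Nat.mul_mod_left]
  · have he : k + 1 = (k % n + 1) + n * (k / n) := by omega
    rw [if_neg h, he, Nat.add_mul_mod_self_left, Nat.mod_eq_of_lt (by omega : k % n + 1 < n)]

-- invariant of A's loop: list1 grows by its own cycle, temp collects the digits' characters
lemma pvLoopA (l1 : List Int) (h1 : l1 ≠ []) (m : Nat) (l2 l3 : List Int) :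
    (((List.range m).foldl (fun st (i : Nat) => keygenStep st (i : Int)) (l1, l2, l3, [])).1
       = l1 ++ (List.range m).map (pvCyc l1)) ∧
    (((List.range m).foldl (fun st (i : Nat) => keygenStep st (i : Int)) (l1, l2, l3, [])).2.2.2
       = (List.range m).flatMap (fun i => PySem.Int.toChars (pvCyc l1 i))) := by
  induction m generalizing l2 l3 with
  | zero => simp
  | succ m ih =>
    rw [List.range_succ, List.foldl_append, List.foldl_cons, List.foldl_nil]
    obtain ⟨ihl, iht⟩ := ih l2 l3
    have hlt : m < l1.length + m := by
      have := List.length_pos_iff.mpr h1; omega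
    constructor
    · show (_ : List Int × List Int × List Int × List Char).1 ++ [_] = _
      rw [ihl, PySem.List.pyGetD_natCast, pvCyc_getD l1 h1 m m hlt]
      simp
    · show (_ : List Int × List Int × List Int × List Char).2.2.2 ++ _ = _
      rw [iht, ihl, PySem.List.pyGetD_natCast, pvCyc_getD l1 h1 m m hlt]
      simp

-- invariant of B's loop: output so far plus the wrap-around pointer's position
lemma pvLoopB (ds : List Int) (hn : ds ≠ []) (m : Nat) :
    (List.range m).foldl
      (fun (st : List String × Nat) (_ : Nat) =>
        (st.1 ++ [PySem.Int.toStr (ds.getD st.2 0)],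
         if st.2 + 1 = ds.length then 0 else st.2 + 1))
      ([], 0)
    = ((List.range m).map (fun i => PySem.Int.toStr (pvCyc ds i)), m % ds.length) := by
  have h0 : 0 < ds.length := List.length_pos_iff.mpr hn
  induction m with
  | zero => simp [Nat.zero_mod]
  | succ m ih =>
    rw [List.range_succ, List.foldl_append, List.foldl_cons, List.foldl_nil, ih]
    refine Prod.ext ?_ ?_
    · show _ ++ [_] = _
      simp [pvCyc]
    · show (if m % ds.length + 1 = ds.length then 0 else m % ds.length + 1) = _
      exact pvSuccMod ds.length m h0

-- each digit char round-trips: str(int(c)) == c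
lemma pvDig_toChars (c : Char) (h1 : 48 ≤ c.toNat) (h2 : c.toNat ≤ 57) :
    PySem.Int.toChars (pvDig c) = [c] := by
  unfold pvDig
  have hc := Char.ofNat_toNat c
  set n := c.toNat with hn
  rw [← hc]
  interval_cases n <;> decide

-- ===== VERDICT (by name: the statement is the Claim_ definition above) =====
theorem keygen_spec : Claim_equal_keygen := by
  intro key length _hdom hpre
  obtain ⟨hdig, hne⟩ := hpre
  unfold Spec_keygen
  simp only [keygen, keygen_alt]
  by_cases hlen : 0 < length
  · -- positive length: both loops run length.toNat steps over the digit cycle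
    have hkey : key.toList ≠ [] := hne hlen
    set ds : List Int := key.toList.map pvDig with hds
    have hdsne : ds ≠ [] := by rw [hds, ne_eq, List.map_eq_nil_iff]; exact hkey
    have hdslen : ds.length = key.toList.length := by simp [hds]
    have hn0 : 0 < ds.length := List.length_pos_iff.mpr hdsne
    have hcast : length = ((length.toNat : Nat) : Int) := by omega
    -- A's keystring is ds
    have hks : key.toList.foldl (fun acc c => acc ++ [pvDig c]) ([] : List Int) = ds := by
      rw [PySem.List.foldl_append_singleton_eq_map]; simp [hds]
    rw [hks, hcast, PySem.List.pyRange_zero_natCast]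
    simp only [List.foldl_map]
    obtain ⟨_, htemp⟩ := pvLoopA ds hdsne length.toNat _ _
    rw [htemp, (pvLoopB ds hdsne length.toNat :)]
    rw [PySem.List.foldl_append_singleton_eq_map, List.nil_append]
    -- per-step: the produced characters are exactly the cycled key char
    have hstep : ∀ i : Nat,
        PySem.Int.toChars (pvCyc ds i) = [key.toList.getD (i % ds.length) ' '] ∧
        PySem.Int.toStr (pvCyc ds i) = String.ofList [key.toList.getD (i % ds.length) ' '] := by
      intro i
      have him : i % ds.length < key.toList.length := hdslen ▸ Nat.mod_lt _ hn0
      have hc : pvCyc ds i = pvDig (key.toList.getD (i % ds.length) ' ') := by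
        rw [pvCyc, List.getD_eq_getElem _ _ (by omega : i % ds.length < ds.length),
            List.getD_eq_getElem _ _ him]
        simp [hds]
      have hmem : key.toList.getD (i % ds.length) ' ' ∈ key.toList := by
        rw [List.getD_eq_getElem _ _ him]; exact List.getElem_mem him
      have hb : 48 ≤ (key.toList.getD (i % ds.length) ' ').toNat ∧
          (key.toList.getD (i % ds.length) ' ').toNat ≤ 57 := by
        simpa using List.all_eq_true.mp hdig _ hmem
      have htc := pvDig_toChars _ hb.1 hb.2
      refine ⟨hc ▸ htc, ?_⟩
      rw [← String.ofList_toList (s := PySem.Int.toStr (pvCyc ds i)), PySem.Int.toList_toStr, hc, htc]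
    calc ((List.range length.toNat).flatMap
            (fun i => PySem.Int.toChars (pvCyc ds i))).map (fun c => String.ofList [c])
        = ((List.range length.toNat).flatMap
            (fun i => [key.toList.getD (i % ds.length) ' '])).map (fun c => String.ofList [c]) := by
          congr 1; exact List.flatMap_congr (fun i _ => (hstep i).1)
      _ = ((List.range length.toNat).map
            (fun i => key.toList.getD (i % ds.length) ' ')).map (fun c => String.ofList [c]) := by
          rw [← List.map_eq_flatMap]
      _ = (List.range length.toNat).map (fun i => PySem.Int.toStr (pvCyc ds i)) := by
          rw [List.map_map]; exact List.map_congr_left (fun i _ => ((hstep i).2).symm)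
  · -- length ≤ 0: range(length) is empty, both return []
    rw [PySem.List.pyRange_one_eq_nil (by omega : length ≤ 0)]
    simp
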